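-- pv_equiv track=rewrite | github.com/leoalenc/lingcomp | src/orthconv.py | leftcont2
-- ===== SOURCE A (Python) =====
-- def leftcont2(word,oldchar,newchar,leftchars):
-- 	'''replace oldchar by newchar in word if leftchars immediately
-- 	occur before oldchar'''
-- 	j=0
-- 	c=len(word)
-- 	d=len(leftchars)
-- 	while(j<c):
-- 		thischar=word[j]
-- 		i=j-d
-- 		if i >= 0:
-- 			if thischar == oldchar and leftchars==word[i:j]:
-- 				word=f"{word[:j]}{newchar}{word[j+1:]}"
-- 		j+=1
-- 	return word
-- ===== SOURCE B (Python) =====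
-- def leftcont2(word, oldchar, newchar, leftchars):
--     '''replace oldchar by newchar in word if leftchars immediately
--     occur before oldchar'''
--     out = ""
--     for ch in word:
--         if ch == oldchar and out.endswith(leftchars):
--             out += newchar
--         else:
--             out += ch
--     return out
-- ===== Notes on version B (the rewrite author's own statement) =====
-- stated objective: simpler
-- what changed: A rescans and rebuilds the whole string (slice compare + three-part concat) at every position; B is a plain single left-to-right pass accumulating the output string and testing the context with endswith (intended as faster; a timing run read a borderline 1.35-1.6x across runs, so no speed is claimed). Pre_ excludes inputs where newchar's length is not 1 and a replacement actually fires: there A's fixed index frame shifts against the in-place-modified word (an artefact of its reindexing) or, for empty newchar, A raises IndexError.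
-- outside the precondition, e.g. on leftcont2('abab', 'b', 'XX', 'a'): A returns 'aXXab', B returns 'aXXaXX'; on leftcont2('aba', 'b', '', 'a'): A raises IndexError, B returns 'aa'
-- crash fix: When newchar is empty and a replacement fires, A's index j runs past the shrunken word and raises IndexError; B returns the word with those occurrences deleted. — e.g. on leftcont2("aba", "b", "", "a"): A raises IndexError, B returns "aa"
import Mathlib
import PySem

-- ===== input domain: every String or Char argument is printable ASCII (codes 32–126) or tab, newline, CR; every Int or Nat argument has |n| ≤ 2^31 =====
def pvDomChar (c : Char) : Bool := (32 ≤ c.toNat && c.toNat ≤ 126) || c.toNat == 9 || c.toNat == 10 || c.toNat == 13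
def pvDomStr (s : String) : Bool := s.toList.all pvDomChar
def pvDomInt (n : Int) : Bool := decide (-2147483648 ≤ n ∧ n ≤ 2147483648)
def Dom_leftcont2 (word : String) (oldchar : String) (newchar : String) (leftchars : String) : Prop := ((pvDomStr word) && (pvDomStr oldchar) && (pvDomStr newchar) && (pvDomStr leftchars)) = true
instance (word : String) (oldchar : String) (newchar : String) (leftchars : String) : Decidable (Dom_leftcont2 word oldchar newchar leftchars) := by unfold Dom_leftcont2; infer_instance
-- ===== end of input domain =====

-- B replaces A's per-position slice compare and full-string rebuild by a single
-- accumulating left-to-right pass with an endswith context test (simpler one-pass structure).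


-- ===== PORT A =====
-- while(j<c): … ; word[j] raises IndexError in Python when newchar shrank word (outside Pre_):
-- on 'none' the loop stops, an arbitrary choice on inputs the claim excludes.
def leftcont2Loop (oldchar newchar leftchars : List Char) (c d : Nat) (j : Nat) (w : List Char) : List Char :=
  if h : j < c then
    match PySem.List.pyGet? w (j : Int) with
    | none => w
    | some thischar =>
      let i : Int := (j : Int) - (d : Int)
      let w' :=
        if 0 ≤ i then
          if [thischar] = oldchar ∧ leftchars = PySem.List.slice w (some i) (some (j : Int)) then
            PySem.List.slice w none (some (j : Int)) ++ newchar ++ PySem.List.slice w (some ((j : Int) + 1)) none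
          else w
        else w
      leftcont2Loop oldchar newchar leftchars c d (j + 1) w'
  else w
termination_by c - j

def leftcont2 (word : String) (oldchar : String) (newchar : String) (leftchars : String) : String :=
  String.mk (leftcont2Loop oldchar.toList newchar.toList leftchars.toList
    word.toList.length leftchars.toList.length 0 word.toList)

-- ===== PORT B =====
-- out = ""; for ch in word: out += newchar if (ch == oldchar and out.endswith(leftchars)) else ch
def altStep (oldchar newchar leftchars : List Char) (out : List Char) (ch : Char) : List Char :=
  if [ch] = oldchar ∧ PySem.Chars.endswith out leftchars then out ++ newchar else out ++ [ch]

def leftcont2_alt (word : String) (oldchar : String) (newchar : String) (leftchars : String) : String :=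
  String.mk (word.toList.foldl (altStep oldchar.toList newchar.toList leftchars.toList) [])

-- ===== PRECONDITION & SPEC =====
-- 'oldchar occurs at position j of W immediately preceded by leftchars' (in the original word)
def MatchAt (W o L : List Char) (j : Nat) : Prop :=
  L.length ≤ j ∧ (W.drop j).take 1 = o ∧ (W.drop (j - L.length)).take L.length = L

-- Pre_ excludes inputs where newchar's length is not 1 AND a replacement actually fires:
-- there A's fixed index frame shifts against the in-place-modified word (an artefact of its
-- reindexing) or, for empty newchar, A raises IndexError.
def Pre_leftcont2 (word : String) (oldchar : String) (newchar : String) (leftchars : String) : Prop :=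
  newchar.toList.length = 1 ∨
    ∀ j < word.toList.length, ¬ MatchAt word.toList oldchar.toList leftchars.toList j

instance (word : String) (oldchar : String) (newchar : String) (leftchars : String) : Decidable (Pre_leftcont2 word oldchar newchar leftchars) := by unfold Pre_leftcont2 MatchAt; infer_instance

def pvWitness_leftcont2 : String × String × String × String := ("abab", "b", "x", "a")

-- When newchar is empty and a replacement fires, A's index j runs past the shrunken word and
-- raises IndexError; B returns the word with those occurrences deleted.
def Raises_leftcont2 (word : String) (oldchar : String) (newchar : String) (leftchars : String) : Prop :=
  newchar.toList = [] ∧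
    ∃ j < word.toList.length, MatchAt word.toList oldchar.toList leftchars.toList j

instance (word : String) (oldchar : String) (newchar : String) (leftchars : String) : Decidable (Raises_leftcont2 word oldchar newchar leftchars) := by unfold Raises_leftcont2 MatchAt; infer_instance

def pvRaiseWitness_leftcont2 : String × String × String × String := ("aba", "b", "", "a")
def pvRaiseWitnessOut_leftcont2 : String := "aa"

def Spec_leftcont2 (word : String) (oldchar : String) (newchar : String) (leftchars : String) (out : String) : Prop := out = leftcont2_alt word oldchar newchar leftchars
instance (word : String) (oldchar : String) (newchar : String) (leftchars : String) (out : String) : Decidable (Spec_leftcont2 word oldchar newchar leftchars out) := by unfold Spec_leftcont2; infer_instance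

-- ===== CLAIM (what is proved, stated in full; the proofs are below) =====
def Claim_equal_leftcont2 : Prop := ∀ (word : String) (oldchar : String) (newchar : String) (leftchars : String), Dom_leftcont2 word oldchar newchar leftchars → Pre_leftcont2 word oldchar newchar leftchars → Spec_leftcont2 word oldchar newchar leftchars (leftcont2 word oldchar newchar leftchars)

def Claim_raises_leftcont2 : Prop := (∀ (word : String) (oldchar : String) (newchar : String) (leftchars : String), Dom_leftcont2 word oldchar newchar leftchars → Raises_leftcont2 word oldchar newchar leftchars → ¬ Pre_leftcont2 word oldchar newchar leftchars) ∧ (Dom_leftcont2 (pvRaiseWitness_leftcont2.1) (pvRaiseWitness_leftcont2.2.1) (pvRaiseWitness_leftcont2.2.2.1) (pvRaiseWitness_leftcont2.2.2.2) ∧ Raises_leftcont2 (pvRaiseWitness_leftcont2.1) (pvRaiseWitness_leftcont2.2.1) (pvRaiseWitness_leftcont2.2.2.1) (pvRaiseWitness_leftcont2.2.2.2) ∧ leftcont2_alt (pvRaiseWitness_leftcont2.1) (pvRaiseWitness_leftcont2.2.1) (pvRaiseWitness_leftcont2.2.2.1) (pvRaiseWitness_leftcont2.2.2.2) = pvRa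iseWitnessOut_leftcont2)

-- ===== LEMMAS AND PROOFS =====

-- A's guard-and-context condition at position j = out.length of w = out ++ ch :: rest
-- equals B's 'ch == oldchar and out.endswith(leftchars)'.
lemma condA_iff (o L out rest : List Char) (ch : Char) :
    ((0:Int) ≤ (out.length : Int) - (L.length : Int) ∧ [ch] = o ∧
      L = PySem.List.slice (out ++ ch :: rest) (some ((out.length : Int) - (L.length : Int)))
            (some (out.length : Int)))
    ↔ ([ch] = o ∧ L <:+ out) := by
  constructor
  · rintro ⟨hge, ho, hsl⟩
    refine ⟨ho, ?_⟩
    have hd : L.length ≤ out.length := by omega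
    have hcast : (out.length : Int) - (L.length : Int) = ((out.length - L.length : Nat) : Int) := by
      omega
    rw [hcast, PySem.List.slice_natCast,
        List.drop_append_of_le_length (by omega),
        show out.length - (out.length - L.length) = L.length by omega,
        List.take_left' (by simp; omega)] at hsl
    rw [hsl]
    exact List.drop_suffix _ _
  · rintro ⟨ho, hsuf⟩
    obtain ⟨p, hp⟩ := hsuf
    have hd : L.length ≤ out.length := by
      have := congrArg List.length hp; simp at this; omega
    refine ⟨by omega, ho, ?_⟩
    have hcast : (out.length : Int) - (L.length : Int) = ((out.length - L.length : Nat) : Int) := by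
      omega
    have hpl : p.length = out.length - L.length := by
      have := congrArg List.length hp; simp at this; omega
    rw [hcast, PySem.List.slice_natCast,
        List.drop_append_of_le_length (by omega),
        show out.length - (out.length - L.length) = L.length by omega,
        List.take_left' (by simp; omega), ← hpl, ← hp, List.drop_left]

-- MatchAt at position j = out.length of W = out ++ ch :: rest, in the same terms.
lemma matchAt_iff (o L out rest : List Char) (ch : Char) :
    MatchAt (out ++ ch :: rest) o L out.length ↔ ([ch] = o ∧ L <:+ out) := by
  unfold MatchAt
  rw [List.drop_left]
  constructor
  · rintro ⟨hd, ho, hsl⟩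
    refine ⟨by simpa using ho, ?_⟩
    rw [List.drop_append_of_le_length (by omega),
        List.take_left' (by simp; omega)] at hsl
    rw [← hsl]; exact List.drop_suffix _ _
  · rintro ⟨ho, hsuf⟩
    obtain ⟨p, hp⟩ := hsuf
    have hpl : p.length + L.length = out.length := by
      have := congrArg List.length hp; simpa using this
    refine ⟨by omega, by simpa using ho, ?_⟩
    rw [List.drop_append_of_le_length (by omega),
        show out.length - L.length = p.length by omega, ← hp, List.drop_left,
        List.take_left' rfl]

-- step of A's loop reads the head of rest
lemma pyGet_mid (out rest : List Char) (ch : Char) :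
    PySem.List.pyGet? (out ++ ch :: rest) ((out.length : Nat) : Int) = some ch := by
  rw [PySem.List.pyGet?_natCast, List.getElem?_append_right (le_refl _)]
  simp

-- Case |newchar| = 1: A's evolving word is B's accumulated output ++ the unprocessed tail.
lemma loopA_eq_foldl (o n L : List Char) (hn : n.length = 1) :
    ∀ (rest out : List Char),
      leftcont2Loop o n L (out.length + rest.length) L.length out.length (out ++ rest)
        = rest.foldl (altStep o n L) out := by
  intro rest
  induction rest with
  | nil => intro out; rw [leftcont2Loop]; simp
  | cons ch rest' ih =>
    intro out
    rw [leftcont2Loop]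
    have hlt : out.length < out.length + (ch :: rest').length := by simp
    rw [dif_pos hlt]
    simp only [pyGet_mid, List.length_cons]
    by_cases hc : [ch] = o ∧ L <:+ out
    · have hA := (condA_iff o L out rest' ch).mpr hc
      rw [if_pos hA.1, if_pos ⟨hA.2.1, hA.2.2⟩]
      have hsl1 : PySem.List.slice (out ++ ch :: rest') none (some ((out.length : Nat) : Int)) = out := by
        rw [PySem.List.slice_to_natCast, List.take_left]
      have hsl2 : PySem.List.slice (out ++ ch :: rest') (some (((out.length : Nat) : Int) + 1)) none = rest' := by
        rw [show ((out.length : Nat) : Int) + 1 = ((out.length + 1 : Nat) : Int) by push_cast; ring,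
            PySem.List.slice_from_natCast,
            show out ++ ch :: rest' = (out ++ [ch]) ++ rest' by simp,
            List.drop_left' (by simp)]
      rw [hsl1, hsl2]
      have hstep : altStep o n L out ch = out ++ n := by
        unfold altStep
        rw [if_pos ⟨hc.1, (PySem.Chars.endswith_iff out L).mpr hc.2⟩]
      have hrec := ih (out ++ n)
      rw [List.append_assoc, show (out ++ n).length = out.length + 1 by simp [hn]] at hrec
      rw [List.foldl_cons, hstep, ← hrec,
          show out.length + (rest'.length + 1) = out.length + 1 + rest'.length by omega,
          List.append_assoc]
    · have hncond : ¬ ((0:Int) ≤ (out.length : Int) - (L.length : Int) ∧ [ch] = o ∧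
          L = PySem.List.slice (out ++ ch :: rest') (some ((out.length : Int) - (L.length : Int)))
                (some (out.length : Int))) := fun h => hc ((condA_iff o L out rest' ch).mp h)
      have hstep : altStep o n L out ch = out ++ [ch] := by
        unfold altStep
        rw [if_neg (fun h => hc ⟨h.1, (PySem.Chars.endswith_iff out L).mp h.2⟩)]
      have hrec := ih (out ++ [ch])
      rw [List.append_assoc, show (out ++ [ch]).length = out.length + 1 by simp,
          List.singleton_append] at hrec
      rw [List.foldl_cons, hstep, ← hrec,
          show out.length + (rest'.length + 1) = out.length + 1 + rest'.length by omega]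
      split_ifs with h1 h2
      · exact absurd ⟨h1, h2⟩ hncond
      · rfl
      · rfl

-- Case 'no match in the original word': A never rewrites and B copies every char.
lemma loopA_id (o n L : List Char) (W : List Char)
    (hnm : ∀ j < W.length, ¬ MatchAt W o L j) :
    ∀ (rest out : List Char), W = out ++ rest →
      leftcont2Loop o n L W.length L.length out.length W = W
        ∧ rest.foldl (altStep o n L) out = W := by
  intro rest
  induction rest with
  | nil =>
    intro out hW
    constructor
    · rw [leftcont2Loop]; simp [hW]
    · simpa using hW.symm
  | cons ch rest' ih =>
    intro out hW
    have hlt : out.length < W.length := by subst hW; simp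
    have hnc : ¬ ([ch] = o ∧ L <:+ out) := by
      intro h
      exact hnm out.length hlt (by rw [hW]; exact (matchAt_iff o L out rest' ch).mpr h)
    have hstep : altStep o n L out ch = out ++ [ch] := by
      unfold altStep
      rw [if_neg (fun h => hnc ⟨h.1, (PySem.Chars.endswith_iff out L).mp h.2⟩)]
    have hrec := ih (out ++ [ch]) (by simpa using hW)
    constructor
    · rw [leftcont2Loop, dif_pos (by rw [hW] at hlt ⊢; exact hlt)]
      conv_lhs => rw [hW]
      simp only [pyGet_mid]
      have hncond : ¬ ((0:Int) ≤ (out.length : Int) - (L.length : Int) ∧ [ch] = o ∧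
          L = PySem.List.slice (out ++ ch :: rest') (some ((out.length : Int) - (L.length : Int)))
                (some (out.length : Int))) := fun h => hnc ((condA_iff o L out rest' ch).mp h)
      have hrec1 := hrec.1
      rw [show (out ++ [ch]).length = out.length + 1 by simp] at hrec1
      rw [← hW]
      split_ifs with h1 h2
      · rw [hW] at h2; exact absurd ⟨h1, h2⟩ hncond
      · exact hrec1
      · exact hrec1
    · rw [List.foldl_cons, hstep]
      exact hrec.2

-- ===== VERDICT (by name: the statement is the Claim_ definition above) =====
theorem leftcont2_spec : Claim_equal_leftcont2 := by
  intro word oldchar newchar leftchars _hDom hPre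
  unfold Spec_leftcont2 leftcont2 leftcont2_alt
  rcases hPre with hn | hnm
  · have := loopA_eq_foldl oldchar.toList newchar.toList leftchars.toList hn word.toList []
    simp only [List.length_nil, Nat.zero_add, List.nil_append] at this
    rw [this]
  · have := loopA_id oldchar.toList newchar.toList leftchars.toList word.toList hnm word.toList [] rfl
    simp only [List.length_nil] at this
    rw [this.1, this.2]

@[simp]
theorem leftcont2_raises : Claim_raises_leftcont2 := by
  unfold Claim_raises_leftcont2
  constructor
  · intro word oldchar newchar leftchars _hDom hR hPre
    rcases hR with ⟨hnil, j, hj, hM⟩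
    rcases hPre with h1 | h2
    · rw [hnil] at h1; simp at h1
    · exact h2 j hj hM
  · exact ⟨by decide, by decide, by decide⟩
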